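-- pv_equiv track=rewrite | github.com/TheSaltyRabbit/Visual | Challenges.py | Challenge15
-- ===== SOURCE A (Python) =====
-- def Challenge15(x):
--   #15. Write a Python program to find two elements don't appear twice in a list where all the other elements appear exactly twice in the list.
--   inputarray=x
--   deletenumber = 0
--   j=0
--   while True:
--     i=j+1
--     while i<len(inputarray):
--       if inputarray[j]==inputarray[i]:
--         deletenumber = inputarray[i]
--         inputarray.remove(deletenumber)
--         inputarray.remove(deletenumber)
--         j=0
--         i=1
--       else: i+=1
--     if j<len(inputarray): j+=1
--     else: return inputarray
-- ===== SOURCE B (Python) =====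
-- def Challenge15(x):
--     # Single forward pass: toggle each value's presence in the result list.
--     # Values with even count cancel out; odd-count values survive, appended at
--     # their last occurrence, matching A's output order. (Unlike A, does not
--     # mutate x; the equivalence is about the return value.)
--     out = []
--     for e in x:
--         if e in out:
--             out.remove(e)
--         else:
--             out.append(e)
--     return out
-- ===== Notes on version B (the rewrite author's own statement) =====
-- stated objective: faster
-- what changed: Replaced A's repeated quadratic rescans with restarts (removing matched pairs from the list and resetting the scan) by a single forward pass that toggles each value's membership in the result list.
import Mathlib
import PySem

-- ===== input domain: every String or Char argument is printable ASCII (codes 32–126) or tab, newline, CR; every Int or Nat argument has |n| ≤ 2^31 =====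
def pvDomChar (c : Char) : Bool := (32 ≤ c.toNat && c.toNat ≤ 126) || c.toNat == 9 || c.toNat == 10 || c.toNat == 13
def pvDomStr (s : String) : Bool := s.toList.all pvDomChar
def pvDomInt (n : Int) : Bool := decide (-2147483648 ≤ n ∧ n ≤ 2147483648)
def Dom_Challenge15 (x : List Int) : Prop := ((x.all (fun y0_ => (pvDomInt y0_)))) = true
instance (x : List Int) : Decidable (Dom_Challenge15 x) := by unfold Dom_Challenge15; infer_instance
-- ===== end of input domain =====

-- B replaces A's repeated rescan-and-restart pair removal by a single forward pass
-- that toggles each value's membership in the result list; equivalence is about the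
-- return value only (the Python A mutates its argument in place, B does not).


-- ===== PORT A =====
-- 'inputarray.remove(v)': here v is always present (it was just read from the list),
-- so Python's ValueError is unreachable; the .getD fallback is dead code.
def pyRemove (xs : List Int) (v : Int) : List Int := (PySem.List.remove? xs v).getD xs

-- length facts cited by Challenge15.go's termination proof
theorem pyRemove_length_of_mem (xs : List Int) (v : Int) (h : v ∈ xs) :
    (pyRemove xs v).length + 1 = xs.length := by
  have hpos : 0 < xs.length := List.length_pos_of_mem h
  simp [pyRemove, PySem.List.remove?_eq_some_erase xs v h, List.length_erase_of_mem h]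
  omega

theorem pyRemove_length_le (xs : List Int) (v : Int) :
    (pyRemove xs v).length ≤ xs.length := by
  by_cases h : v ∈ xs
  · have := pyRemove_length_of_mem xs v h; omega
  · simp [pyRemove, (PySem.List.remove?_eq_none_iff xs v).mpr h]

-- the nested while loops of A as one recursion on the state (inputarray, j, i);
-- in every reachable state j < i, so 'xs.getD j 0' is Python's inputarray[j] exactly.
def Challenge15.go (xs : List Int) (j i : Nat) : List Int :=
  if _h : i < xs.length then
    if xs.getD j 0 = xs.getD i 0 then
      Challenge15.go (pyRemove (pyRemove xs (xs.getD i 0)) (xs.getD i 0)) 0 1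
    else
      Challenge15.go xs j (i + 1)
  else if j < xs.length then
    Challenge15.go xs (j + 1) (j + 1 + 1)
  else xs
termination_by (xs.length, xs.length - j, xs.length - i)
decreasing_by
  · apply Prod.Lex.left
    have hv : (xs.getD i 0) ∈ xs := by
      rw [List.getD_eq_getElem xs 0 _h]; exact List.getElem_mem _h
    have h1 := pyRemove_length_of_mem xs _ hv
    have h2 := pyRemove_length_le (pyRemove xs (xs.getD i 0)) (xs.getD i 0)
    omega
  · apply Prod.Lex.right
    apply Prod.Lex.right
    omega
  · apply Prod.Lex.right
    apply Prod.Lex.left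
    omega

def Challenge15 (x : List Int) : List Int := Challenge15.go x 0 1

-- ===== PORT B =====
-- 'out.remove(e)' runs only when e ∈ out, so remove? always succeeds; .getD is dead code.
def toggleStep (out : List Int) (e : Int) : List Int :=
  if e ∈ out then (PySem.List.remove? out e).getD out else out ++ [e]

def Challenge15_alt (x : List Int) : List Int := x.foldl toggleStep []

-- ===== PRECONDITION & SPEC =====
def Spec_Challenge15 (x : List Int) (out : List Int) : Prop := out = Challenge15_alt x
instance (x : List Int) (out : List Int) : Decidable (Spec_Challenge15 x out) := by unfold Spec_Challenge15; infer_instance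

-- ===== CLAIM (what is proved, stated in full; the proofs are below) =====
def Claim_equal_Challenge15 : Prop := ∀ (x : List Int), Dom_Challenge15 x → Spec_Challenge15 x (Challenge15 x)

-- ===== LEMMAS AND PROOFS =====

-- toggleStep unfoldings
theorem step_of_mem (out : List Int) (a : Int) (h : a ∈ out) :
    toggleStep out a = out.erase a := by
  simp [toggleStep, h, PySem.List.remove?_eq_some_erase out a h]

theorem step_of_not_mem (out : List Int) (a : Int) (h : a ∉ out) :
    toggleStep out a = out ++ [a] := by
  simp [toggleStep, h]

theorem nodup_step (out : List Int) (a : Int) (h : out.Nodup) :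
    (toggleStep out a).Nodup := by
  by_cases ha : a ∈ out
  · rw [step_of_mem out a ha]; exact h.erase a
  · rw [step_of_not_mem out a ha]
    exact List.Nodup.append h (List.nodup_singleton a) (by simp [ha])

theorem mem_step_of_ne (out : List Int) (a v : Int) (hne : ¬ a = v) (hv : v ∈ out) :
    v ∈ toggleStep out a := by
  by_cases hm : a ∈ out
  · rw [step_of_mem out a hm]
    exact (List.mem_erase_of_ne (fun h => hne h.symm)).mpr hv
  · rw [step_of_not_mem out a hm]; exact List.mem_append_left _ hv

theorem not_mem_step_of_ne (out : List Int) (a v : Int) (hne : ¬ v = a) (hv : v ∉ out) :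
    v ∉ toggleStep out a := by
  by_cases hm : a ∈ out
  · rw [step_of_mem out a hm]; exact fun h => hv (List.mem_of_mem_erase h)
  · rw [step_of_not_mem out a hm]
    simp only [List.mem_append, List.mem_singleton, not_or]
    exact ⟨hv, hne⟩

theorem step_erase_comm (out : List Int) (b v : Int) (hb : b ≠ v) :
    toggleStep (out.erase v) b = (toggleStep out b).erase v := by
  by_cases hm : b ∈ out
  · rw [step_of_mem out b hm, step_of_mem _ b ((List.mem_erase_of_ne hb).mpr hm),
      List.erase_comm]
  · rw [step_of_not_mem out b hm,
      step_of_not_mem _ b (fun hc => hm (List.mem_of_mem_erase hc))]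
    by_cases hv : v ∈ out
    · rw [List.erase_append_left _ hv]
    · rw [List.erase_of_not_mem hv, List.erase_of_not_mem (by
        simp [hv, hb.symm])]

-- second occurrence: once v sits in the accumulator, the next v in the stream cancels it
theorem toggle_cancel (v : Int) :
    ∀ (t out : List Int), out.Nodup → v ∈ out → v ∈ t →
      List.foldl toggleStep out t = List.foldl toggleStep (out.erase v) (t.erase v) := by
  intro t
  induction t with
  | nil => intro out _ _ h; simp at h
  | cons b t' ih =>
    intro out hnd hvo hvt
    by_cases hb : b = v
    · subst hb
      simp only [List.foldl_cons, List.erase_cons_head]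
      rw [step_of_mem out b hvo]
    · have hvt' : v ∈ t' := by
        rcases List.mem_cons.mp hvt with h | h
        · exact absurd h.symm hb
        · exact h
      have hec : (b :: t').erase v = b :: t'.erase v := by
        rw [List.erase_cons_tail]
        simp [hb]
      rw [hec]
      simp only [List.foldl_cons]
      rw [step_erase_comm out b v hb]
      exact ih (toggleStep out b) (nodup_step out b hnd)
        (mem_step_of_ne out b v hb hvo) hvt'

-- removing the first two occurrences of a duplicated value does not change the toggle result
theorem toggle_removePair (v : Int) :
    ∀ (xs out : List Int), out.Nodup → v ∉ out → 2 ≤ xs.count v →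
      List.foldl toggleStep out ((xs.erase v).erase v) = List.foldl toggleStep out xs := by
  intro xs
  induction xs with
  | nil => intro out _ _ h; simp at h
  | cons a t ih =>
    intro out hnd hvo hc
    by_cases ha : a = v
    · subst ha
      have hvt : a ∈ t := by
        have h1 : List.count a (a :: t) = List.count a t + 1 := List.count_cons_self
        exact List.count_pos_iff.mp (by omega)
      simp only [List.erase_cons_head, List.foldl_cons]
      rw [step_of_not_mem out a hvo,
        toggle_cancel a t (out ++ [a]) (by
          exact List.Nodup.append hnd (List.nodup_singleton a) (by simp [hvo]))
          (by simp) hvt,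
        List.erase_append_right _ hvo]
      simp
    · have hc' : 2 ≤ t.count v := by
        simpa [List.count_cons, ha] using hc
      have hav : ¬ v = a := fun h => ha h.symm
      have hrw : ((a :: t).erase v).erase v = a :: ((t.erase v).erase v) := by
        rw [List.erase_cons_tail (by simp [ha]), List.erase_cons_tail (by simp [ha])]
      rw [hrw]
      simp only [List.foldl_cons]
      exact ih (toggleStep out a) (nodup_step out a hnd)
        (not_mem_step_of_ne out a v hav hvo) hc'

-- on a duplicate-free list the toggle pass is the identity
theorem toggle_disjoint :
    ∀ (l out : List Int), (∀ e ∈ l, e ∉ out) → l.Nodup →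
      List.foldl toggleStep out l = out ++ l := by
  intro l
  induction l with
  | nil => intro out _ _; simp
  | cons a t ih =>
    intro out hd hnd
    simp only [List.foldl_cons]
    rw [step_of_not_mem out a (hd a (by simp))]
    rw [ih (out ++ [a]) ?_ hnd.of_cons]
    · simp
    · intro e he
      simp only [List.mem_append, List.mem_singleton, not_or]
      exact ⟨hd e (by simp [he]), fun h => (List.nodup_cons.mp hnd).1 (h ▸ he)⟩

theorem toggle_nodup_id (l : List Int) (h : l.Nodup) :
    List.foldl toggleStep [] l = l := by
  simpa using toggle_disjoint l [] (by simp) h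

-- the loop invariant of A's scan: everything left of j is duplicate-free w.r.t. the
-- rest of the list, and position j has been checked against positions (j, i)
def InvA (xs : List Int) (j i : Nat) : Prop :=
  j < i ∧
  (∀ a b, a < j → a < b → b < xs.length → xs.getD a 0 ≠ xs.getD b 0) ∧
  (∀ k, j < k → k < i → k < xs.length → xs.getD j 0 ≠ xs.getD k 0)

theorem count_two_of_pair (xs : List Int) (j i : Nat) (hj : j < i) (hi : i < xs.length)
    (h : xs.getD j 0 = xs.getD i 0) : 2 ≤ xs.count (xs.getD i 0) := by
  have hjl : j < xs.length := lt_trans hj hi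
  have m1 : xs.getD i 0 ∈ xs.take i := by
    rw [← h]
    have hjt : j < (xs.take i).length := by rw [List.length_take]; omega
    have hg : (xs.take i)[j] = xs[j] := List.getElem_take
    rw [List.getD_eq_getElem xs 0 hjl, ← hg]
    exact List.getElem_mem hjt
  have m2 : xs.getD i 0 ∈ xs.drop i := by
    have h0 : 0 < (xs.drop i).length := by rw [List.length_drop]; omega
    have hg : (xs.drop i)[0] = xs[i] := by simp
    rw [List.getD_eq_getElem xs 0 hi, ← hg]
    exact List.getElem_mem h0
  have hsplit := List.take_append_drop i xs
  calc 2 ≤ (xs.take i).count (xs.getD i 0) + (xs.drop i).count (xs.getD i 0) := by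
        have c1 := List.count_pos_iff.mpr m1
        have c2 := List.count_pos_iff.mpr m2
        omega
    _ = xs.count (xs.getD i 0) := by rw [← List.count_append, hsplit]

theorem go_eq (xs : List Int) (j i : Nat) (hInv : InvA xs j i) :
    Challenge15.go xs j i = List.foldl toggleStep [] xs := by
  induction xs, j, i using Challenge15.go.induct with
  | case1 xs j i hi hEq ih =>
    rw [Challenge15.go]
    simp only [hi, hEq, if_pos, dif_pos]
    obtain ⟨hji, _, _⟩ := hInv
    have hc := count_two_of_pair xs j i hji hi hEq
    have hv : xs.getD i 0 ∈ xs := by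
      rw [List.getD_eq_getElem xs 0 hi]; exact List.getElem_mem hi
    have hv' : xs.getD i 0 ∈ xs.erase (xs.getD i 0) := by
      have h1 : (xs.erase (xs.getD i 0)).count (xs.getD i 0)
          = xs.count (xs.getD i 0) - 1 := List.count_erase_self
      have h2 : 0 < (xs.erase (xs.getD i 0)).count (xs.getD i 0) := by
        rw [h1]; omega
      exact List.count_pos_iff.mp h2
    have hr : pyRemove (pyRemove xs (xs.getD i 0)) (xs.getD i 0)
        = (xs.erase (xs.getD i 0)).erase (xs.getD i 0) := by
      unfold pyRemove
      rw [PySem.List.remove?_eq_some_erase xs _ hv, Option.getD_some,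
        PySem.List.remove?_eq_some_erase _ _ hv', Option.getD_some]
    rw [hr] at ih ⊢
    rw [ih ⟨Nat.zero_lt_one, by omega, by omega⟩]
    exact toggle_removePair (xs.getD i 0) xs [] (by simp) (by simp) hc
  | case2 xs j i hi hEq ih =>
    rw [Challenge15.go]
    simp only [hi, hEq, dif_pos]
    obtain ⟨hji, h2, h3⟩ := hInv
    refine ih ⟨by omega, h2, ?_⟩
    intro k hjk hki hkl
    by_cases hk : k = i
    · subst hk; exact hEq
    · exact h3 k hjk (by omega) hkl
  | case3 xs j i hi hj ih =>
    rw [Challenge15.go]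
    simp only [hi, hj, if_pos]
    obtain ⟨hji, h2, h3⟩ := hInv
    refine ih ⟨by omega, ?_, by omega⟩
    intro a b haj hab hbl
    by_cases ha : a = j
    · subst ha
      exact h3 b hab (by omega) hbl
    · exact h2 a b (by omega) hab hbl
  | case4 xs j i hi hj =>
    rw [Challenge15.go]
    simp only [hi, hj]
    obtain ⟨_, h2, _⟩ := hInv
    have hnd : xs.Nodup := by
      rw [List.nodup_iff_getElem?_ne_getElem?]
      intro a b hab hbl
      have hne := h2 a b (by omega) hab hbl
      rw [List.getD_eq_getElem xs 0 (by omega), List.getD_eq_getElem xs 0 hbl] at hne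
      simp [hbl, lt_trans hab hbl, hne]
    exact (toggle_nodup_id xs hnd).symm

-- ===== VERDICT (by name: the statement is the Claim_ definition above) =====
theorem Challenge15_spec : Claim_equal_Challenge15 := by
  intro x _
  show Challenge15 x = Challenge15_alt x
  rw [Challenge15, Challenge15_alt]
  exact go_eq x 0 1 ⟨Nat.zero_lt_one, by omega, by omega⟩
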